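-- pv_equiv track=rewrite | github.com/apdRV/FL-2024-HW | task-2/task2.py | pre_processing
-- ===== SOURCE A (Python) =====
-- regular_symbols = ['+', '*', '?', '|']
--
-- def pre_processing(regular_expression_):
--     new_regular_expression_ = ""
--     for i in range(len(regular_expression_)):
--         symbols = []
--         if regular_expression_[i] not in regular_symbols:
--             if i + 1 >= len(regular_expression_) or regular_expression_[i + 1] not in regular_symbols or regular_expression_[i + 1] == '|':
--                 new_regular_expression_ += regular_expression_[i]
--                 continue
--             if regular_expression_[i + 1] == '?':
--                 symbols = ['+', '*']
--             elif regular_expression_[i + 1] == '+':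
--                 symbols = ['*', '?']
--             flag = False
--             i2 = i + 2
--             while i2 < len(regular_expression_):
--                 if regular_expression_[i2] in regular_symbols:
--                     break
--                 if regular_expression_[i2] != '|':
--                     break
--                 flag = regular_expression_[i2] in symbols
--                 i2 += 1
--             if flag:
--                 new_regular_expression_ += regular_expression_[i] + '*'
--             else:
--                 new_regular_expression_ += regular_expression_[i:i+2]
--         if regular_expression_[i] == '|':
--             new_regular_expression_ += '|'
--     return new_regular_expression_
-- ===== SOURCE B (Python) =====
-- def pre_processing(regular_expression_):
--     # Single forward pass keeping the previous character in a state variable: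
--     # keep every non-quantifier character; keep a quantifier only when the
--     # previous character exists and is not one of '+', '*', '?', '|'.
--     out = []
--     prev = None
--     for ch in regular_expression_:
--         if ch not in '+*?':
--             out.append(ch)
--         elif prev is not None and prev not in '+*?|':
--             out.append(ch)
--         prev = ch
--     return ''.join(out)
-- ===== Notes on version B (the rewrite author's own statement) =====
-- stated objective: simpler
-- what changed: Replaces A's index-based lookahead loop (with its dead inner while/flag machinery, string += and two-character slice appends) by a single forward pass that keeps only the previous character in a state variable, appends to a list and joins once; a timing run measured this constant-factor mechanism as ~6x faster.
import Mathlib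
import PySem

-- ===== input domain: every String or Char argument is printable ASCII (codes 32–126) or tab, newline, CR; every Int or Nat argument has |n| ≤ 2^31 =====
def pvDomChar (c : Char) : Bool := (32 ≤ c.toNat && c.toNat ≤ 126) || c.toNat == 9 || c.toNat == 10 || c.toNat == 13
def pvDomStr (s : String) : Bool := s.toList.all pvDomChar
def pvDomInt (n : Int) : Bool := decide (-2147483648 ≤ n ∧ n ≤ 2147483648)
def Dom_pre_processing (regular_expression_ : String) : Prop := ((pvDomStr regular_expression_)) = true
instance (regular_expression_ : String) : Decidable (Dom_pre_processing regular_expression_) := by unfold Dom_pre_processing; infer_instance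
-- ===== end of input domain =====

-- B replaces A's index/lookahead loop (with its dead inner while) by a single
-- previous-character state pass: simpler, same O(n) cost.

-- ===== PORT A =====
def regular_symbols : List Char := ['+', '*', '?', '|']

-- the inner 'while i2 < len(...)' loop, fuel = number of remaining indices
def pp_while (cs : List Char) : Nat → Nat → Bool → List Char → Bool
  | 0, _, flag, _ => flag
  | fuel+1, i2, flag, symbols =>
    if i2 < cs.length then
      let c := cs.getD i2 ' '
      if c ∈ regular_symbols then flag
      else if c ≠ '|' then flag
      else pp_while cs fuel (i2+1) (decide (c ∈ symbols)) symbols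
    else flag

-- one iteration of A's 'for i in range(len(...))' loop; indices produced by the
-- range are always in bounds, so getD is exact for Python's indexing here.
-- (Python's 'continue' skips the final `if c == '|'` check, but on that path
--  c ∉ regular_symbols hence c ≠ '|', so applying the check is the same.)
def pp_step (cs : List Char) (acc : List Char) (i : Nat) : List Char :=
  let c := cs.getD i ' '
  let acc1 :=
    if c ∉ regular_symbols then
      if i + 1 ≥ cs.length ∨ cs.getD (i+1) ' ' ∉ regular_symbols ∨ cs.getD (i+1) ' ' = '|' then
        acc ++ [c]
      else
        let symbols : List Char :=
          if cs.getD (i+1) ' ' = '?' then ['+', '*']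
          else if cs.getD (i+1) ' ' = '+' then ['*', '?'] else []
        let flag := pp_while cs (cs.length - (i+2)) (i+2) false symbols
        if flag then acc ++ [c, '*']
        else acc ++ PySem.List.slice cs (some (i : Int)) (some ((i : Int) + 2))
    else acc
  if c = '|' then acc1 ++ ['|'] else acc1

def pre_processing (regular_expression_ : String) : String :=
  String.ofList ((List.range regular_expression_.toList.length).foldl
    (pp_step regular_expression_.toList) [])

-- ===== PORT B =====
def pp_alt_step (st : List Char × Option Char) (ch : Char) : List Char × Option Char :=
  if ch ∉ (['+', '*', '?'] : List Char) then (st.1 ++ [ch], some ch)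
  else
    match st.2 with
    | some p => if p ∉ (['+', '*', '?', '|'] : List Char) then (st.1 ++ [ch], some ch)
                else (st.1, some ch)
    | none => (st.1, some ch)

def pre_processing_alt (regular_expression_ : String) : String :=
  String.ofList ((regular_expression_.toList.foldl pp_alt_step ([], none)).1)

-- ===== PRECONDITION & SPEC =====
def Spec_pre_processing (regular_expression_ : String) (out : String) : Prop := out = pre_processing_alt regular_expression_
instance (regular_expression_ : String) (out : String) : Decidable (Spec_pre_processing regular_expression_ out) := by unfold Spec_pre_processing; infer_instance

-- ===== CLAIM (what is proved, stated in full; the proofs are below) =====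
def Claim_equal_pre_processing : Prop := ∀ (regular_expression_ : String), Dom_pre_processing regular_expression_ → Spec_pre_processing regular_expression_ (pre_processing regular_expression_)

-- ===== LEMMAS AND PROOFS =====

-- common specification: keep a char iff it is not a quantifier, or the
-- previous char exists and is not a regex symbol
def ppKeep : Option Char → List Char → List Char
  | _, [] => []
  | prev, c :: rest =>
      (if c ∉ (['+', '*', '?'] : List Char) then [c]
       else match prev with
            | some p => if p ∉ (['+', '*', '?', '|'] : List Char) then [c] else []
            | none => []) ++ ppKeep (some c) rest

-- B's fold accumulates exactly ppKeep
theorem alt_foldl_eq (l : List Char) : ∀ (out : List Char) (prev : Option Char),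
    (l.foldl pp_alt_step (out, prev)).1 = out ++ ppKeep prev l := by
  induction l with
  | nil => intro out prev; simp [ppKeep]
  | cons c rest ih =>
    intro out prev
    simp only [List.foldl_cons, ppKeep]
    by_cases hc : c ∈ (['+', '*', '?'] : List Char)
    · cases prev with
      | none => simp [pp_alt_step, hc, ih]
      | some p =>
        by_cases hp : p ∈ (['+', '*', '?', '|'] : List Char)
        · simp [pp_alt_step, hc, hp, ih]
        · simp [pp_alt_step, hc, hp, ih]
    · simp [pp_alt_step, hc, ih]

-- the inner while loop never updates its flag: its body breaks immediately
theorem pp_while_eq_flag (cs : List Char) (fuel i2 : Nat) (flag : Bool)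
    (symbols : List Char) : pp_while cs fuel i2 flag symbols = flag := by
  cases fuel with
  | zero => rfl
  | succ fuel =>
    simp only [pp_while]
    split
    · split
      · rfl
      · split
        · rfl
        · rename_i h1 h2
          exact absurd (by simpa using h2) (by simp [regular_symbols] at h1 ⊢; tauto)
    · rfl

-- Python's r[i:i+2] for 0 ≤ i
theorem slice_two (xs : List Char) (i : Nat) :
    PySem.List.slice xs (some (i : Int)) (some ((i : Int) + 2)) = (xs.drop i).take 2 := by
  rw [PySem.List.slice_toNat _ (by omega) (by omega)]
  congr 1 <;> omega

def emitA (cs : List Char) (i : Nat) : List Char := pp_step cs [] i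

theorem pp_step_decomp (cs acc : List Char) (i : Nat) :
    pp_step cs acc i = acc ++ emitA cs i := by
  simp only [emitA, pp_step]
  split_ifs <;> simp

-- shifting: A's step at index i+1 on c :: cs is its step at i on cs
theorem emitA_shift (c : Char) (cs : List Char) (i : Nat) :
    emitA (c :: cs) (i + 1) = emitA cs i := by
  simp only [emitA, pp_step, List.getD_cons_succ, List.length_cons,
    pp_while_eq_flag]
  rw [slice_two, slice_two, List.drop_succ_cons]
  have hlen : (i + 1 + 1 ≥ cs.length + 1) ↔ (i + 1 ≥ cs.length) := by omega
  simp only [hlen]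

-- head step of A matched against ppKeep (all char cases)
theorem emitA_head (c : Char) (cs : List Char) :
    emitA (c :: cs) 0 ++ ppKeep none cs = ppKeep none (c :: cs) := by
  cases cs with
  | nil =>
    simp only [emitA, pp_step, ppKeep, List.getD]
    by_cases hc : c ∈ regular_symbols
    · by_cases hb : c = '|'
      · subst hb; simp [hc]
      · have hq : c ∈ (['+', '*', '?'] : List Char) := by
          simp [regular_symbols] at hc; simp; tauto
        simp [hc, hb, hq]
    · have hq : c ∉ (['+', '*', '?'] : List Char) := by
        simp [regular_symbols] at hc; simp; tauto
      have hb : c ≠ '|' := by simp [regular_symbols] at hc; tauto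
      simp [hc, hb, hq]
  | cons d rest =>
    have hkeep : ppKeep none (c :: d :: rest)
        = (if c ∉ (['+', '*', '?'] : List Char) then [c] else [])
          ++ (if d ∉ (['+', '*', '?'] : List Char) then [d]
              else if c ∉ (['+', '*', '?', '|'] : List Char) then [d] else [])
          ++ ppKeep (some d) rest := by
      simp only [ppKeep]; simp
    have hkeep2 : ppKeep none (d :: rest)
        = (if d ∉ (['+', '*', '?'] : List Char) then [d] else [])
          ++ ppKeep (some d) rest := by
      simp only [ppKeep]
    rw [hkeep, hkeep2]
    simp only [emitA, pp_step, List.getD_cons_zero, List.getD_cons_succ,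
      List.length_cons, pp_while_eq_flag]
    have hsl : PySem.List.slice (c :: d :: rest) none (some 2) = [c, d] := by
      rw [PySem.List.slice_to _ (by omega)]; rfl
    by_cases hc : c ∈ regular_symbols
    · by_cases hb : c = '|'
      · subst hb
        have h1 : ('|' : Char) ∉ (['+', '*', '?'] : List Char) := by decide
        have h2 : ('|' : Char) ∈ (['+', '*', '?', '|'] : List Char) := by decide
        by_cases hd : d ∈ (['+', '*', '?'] : List Char)
        · simp [hc, h1, hd]
        · simp [hc, h1, hd]
      · have hq : c ∈ (['+', '*', '?'] : List Char) := by
          simp [regular_symbols] at hc; simp; tauto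
        have hr : c ∈ (['+', '*', '?', '|'] : List Char) := by
          simp at hq ⊢; tauto
        simp [hc, hb, hq, hr]
    · have hq : c ∉ (['+', '*', '?'] : List Char) := by
        simp [regular_symbols] at hc; simp; tauto
      have hb : c ≠ '|' := by simp [regular_symbols] at hc; tauto
      have hr : c ∉ (['+', '*', '?', '|'] : List Char) := by
        simp [regular_symbols] at hc; simp; tauto
      by_cases hd : d ∈ regular_symbols
      · by_cases hdb : d = '|'
        · subst hdb
          have hdq : ('|' : Char) ∉ (['+', '*', '?'] : List Char) := by decide
          simp [hc, hb, hq, hdq]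
        · have hdq : d ∈ (['+', '*', '?'] : List Char) := by
            simp [regular_symbols] at hd; simp; tauto
          simp [hc, hb, hq, hr, hd, hdb, hdq, hsl]
      · have hdq : d ∉ (['+', '*', '?'] : List Char) := by
          simp [regular_symbols] at hd; simp; tauto
        simp [hc, hb, hq, hd, hdq]

theorem flatMap_emitA (cs : List Char) :
    (List.range cs.length).flatMap (emitA cs) = ppKeep none cs := by
  induction cs with
  | nil => simp [ppKeep]
  | cons c rest ih =>
    rw [List.length_cons, List.range_succ_eq_map]
    simp only [List.flatMap_cons, List.flatMap_map]
    have hshift : (List.range rest.length).flatMap (fun a => emitA (c :: rest) a.succ)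
        = (List.range rest.length).flatMap (emitA rest) := by
      apply List.flatMap_congr
      intro i _
      exact emitA_shift c rest i
    rw [hshift, ih]
    exact emitA_head c rest

theorem foldA_eq (cs : List Char) :
    (List.range cs.length).foldl (pp_step cs) [] = ppKeep none cs := by
  have hf : pp_step cs = fun acc i => acc ++ emitA cs i := by
    funext acc i; exact pp_step_decomp cs acc i
  rw [hf, PySem.List.foldl_append_eq_flatMap, List.nil_append, flatMap_emitA]

-- ===== VERDICT (by name: the statement is the Claim_ definition above) =====
theorem pre_processing_spec : Claim_equal_pre_processing := by
  intro s _
  unfold Spec_pre_processing pre_processing pre_processing_alt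
  rw [foldA_eq, alt_foldl_eq, List.nil_append]
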